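-- pv_equiv track=rewrite | github.com/AUTO-KKYU/coding-test | 프로그래머스/0/181887. 홀수 vs 짝수/홀수 vs 짝수.py | solution
-- ===== SOURCE A (Python) =====
-- def solution(num_list):
--     sum_odd = 0
--     sum_even = 0
--
--     for idx, num in enumerate(num_list):
--         if (idx + 1) % 2 == 1:
--             sum_odd += num
--         else:
--             sum_even += num
--
--     return max(sum_odd, sum_even)
-- ===== SOURCE B (Python) =====
-- def solution(num_list):
--     return max(sum(num_list[0::2]), sum(num_list[1::2]))
-- ===== Notes on version B (the rewrite author's own statement) =====
-- stated objective: idiomatic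
-- what changed: Replaced the single enumerate loop with a per-index parity branch by two strided-slice sums (sum(num_list[0::2]) and sum(num_list[1::2])) combined with max.
import Mathlib
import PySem

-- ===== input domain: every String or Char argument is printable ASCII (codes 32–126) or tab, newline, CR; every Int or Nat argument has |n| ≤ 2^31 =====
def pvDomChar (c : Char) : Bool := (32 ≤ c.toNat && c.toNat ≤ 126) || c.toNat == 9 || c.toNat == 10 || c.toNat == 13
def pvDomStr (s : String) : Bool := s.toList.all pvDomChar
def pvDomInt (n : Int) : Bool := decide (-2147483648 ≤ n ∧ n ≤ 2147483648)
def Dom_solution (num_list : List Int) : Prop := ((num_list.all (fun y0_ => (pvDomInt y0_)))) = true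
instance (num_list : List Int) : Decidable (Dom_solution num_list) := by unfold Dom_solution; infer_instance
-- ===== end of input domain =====

-- B replaces A's single enumerate loop with a parity branch by two strided-slice sums (idiomatic; same O(n) cost).

-- ===== PORT A =====
-- one fused pass: fold over enumerate, dispatching on (idx + 1) % 2 == 1
def solution (num_list : List Int) : Int :=
  let p := (PySem.List.enumerate num_list).foldl
    (fun (s : Int × Int) (iv : Int × Int) =>
      if PySem.Int.mod (iv.1 + 1) 2 == 1 then (s.1 + iv.2, s.2) else (s.1, s.2 + iv.2))
    (0, 0)
  max p.1 p.2

-- ===== PORT B =====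
-- two strided-slice sums: max(sum(num_list[0::2]), sum(num_list[1::2]))
def solution_alt (num_list : List Int) : Int :=
  max ((PySem.List.slice? num_list (some 0) none 2).getD []).sum
      ((PySem.List.slice? num_list (some 1) none 2).getD []).sum

-- ===== PRECONDITION & SPEC =====
def Spec_solution (num_list : List Int) (out : Int) : Prop := out = solution_alt num_list
instance (num_list : List Int) (out : Int) : Decidable (Spec_solution num_list out) := by unfold Spec_solution; infer_instance

-- ===== CLAIM (what is proved, stated in full; the proofs are below) =====
def Claim_equal_solution : Prop := ∀ (num_list : List Int), Dom_solution num_list → Spec_solution num_list (solution num_list)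

-- ===== LEMMAS AND PROOFS =====
def pvEvens : List Int → List Int
  | [] => []
  | [a] => [a]
  | a :: _ :: t => a :: pvEvens t

theorem pvFilterMap_even (xs : List Int) :
    List.filterMap (fun (k : Nat) => xs[((0:Int) + 2 * (k:Int)).toNat]?) (List.range ((xs.length + 1) / 2))
      = pvEvens xs := by
  induction xs using pvEvens.induct with
  | case1 => simp [pvEvens]
  | case2 a => simp [pvEvens]
  | case3 a b t ih =>
    have hlen : ((a :: b :: t).length + 1) / 2 = (t.length + 1) / 2 + 1 := by
      simp only [List.length_cons]; omega
    rw [hlen, List.range_succ_eq_map, List.filterMap_cons, List.filterMap_map]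
    have h0 : ((0:Int) + 2 * ((0:Nat):Int)).toNat = 0 := by norm_num
    rw [h0]
    simp only [List.getElem?_cons_zero, Function.comp_def, pvEvens]
    rw [← ih]
    refine congrArg (a :: ·) ?_
    apply List.filterMap_congr
    intro k _
    simp only [Nat.succ_eq_add_one]
    have h1 : ((0:Int) + 2 * ((k+1 : Nat):Int)).toNat = ((0:Int) + 2 * (k:Int)).toNat + 2 := by
      push_cast; omega
    rw [h1]
    simp [List.getElem?_cons_succ]

def pvOdds : List Int → List Int
  | [] => []
  | [_] => []
  | _ :: b :: t => b :: pvOdds t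

theorem pvFilterMap_odd (xs : List Int) :
    List.filterMap (fun (k : Nat) => xs[((1:Int) + 2 * (k:Int)).toNat]?) (List.range (xs.length / 2))
      = pvOdds xs := by
  induction xs using pvOdds.induct with
  | case1 => simp [pvOdds]
  | case2 a => simp [pvOdds]
  | case3 a b t ih =>
    have hlen : (a :: b :: t).length / 2 = t.length / 2 + 1 := by
      simp only [List.length_cons]; omega
    rw [hlen, List.range_succ_eq_map, List.filterMap_cons, List.filterMap_map]
    have h0 : ((1:Int) + 2 * ((0:Nat):Int)).toNat = 1 := by norm_num
    rw [h0]
    simp only [List.getElem?_cons_succ, List.getElem?_cons_zero, Function.comp_def, pvOdds]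
    rw [← ih]
    refine congrArg (b :: ·) ?_
    apply List.filterMap_congr
    intro k _
    simp only [Nat.succ_eq_add_one]
    have h1 : ((1:Int) + 2 * ((k+1 : Nat):Int)).toNat = ((1:Int) + 2 * (k:Int)).toNat + 2 := by
      push_cast; omega
    rw [h1]
    simp [List.getElem?_cons_succ]

theorem pvSliceEven (xs : List Int) :
    PySem.List.slice? xs (some 0) none 2 = some (pvEvens xs) := by
  rw [← pvFilterMap_even]
  simp only [PySem.List.slice?, PySem.List.sliceIndices]
  norm_num
  have hc : (if 0 < xs.length then (((xs.length:Int) + 2 - 1) / 2).toNat else 0)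
      = (xs.length + 1) / 2 := by split_ifs <;> omega
  rw [hc]

theorem pvSliceOdd (xs : List Int) :
    PySem.List.slice? xs (some 1) none 2 = some (pvOdds xs) := by
  cases xs with
  | nil => rfl
  | cons a t =>
    rw [← pvFilterMap_odd (a :: t)]
    simp only [PySem.List.slice?, PySem.List.sliceIndices]
    norm_num
    have hc : (if 0 < t.length then (((t.length:Int) + 2 - 1) / 2).toNat else 0)
        = (t.length + 1) / 2 := by split_ifs <;> omega
    rw [hc]

theorem pvFold (xs : List Int) : ∀ (m x y : Int),
    (PySem.List.enumerate xs (2 * m)).foldl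
      (fun (s : Int × Int) (iv : Int × Int) =>
        if PySem.Int.mod (iv.1 + 1) 2 == 1 then (s.1 + iv.2, s.2) else (s.1, s.2 + iv.2))
      (x, y)
      = (x + (pvEvens xs).sum, y + (pvOdds xs).sum) := by
  induction xs using pvEvens.induct with
  | case1 => intro m x y; simp [PySem.List.enumerate_nil, pvEvens, pvOdds]
  | case2 a =>
    intro m x y
    simp only [PySem.List.enumerate_cons, PySem.List.enumerate_nil, List.foldl_cons, List.foldl_nil]
    have h1 : (PySem.Int.mod (2 * m + 1) 2 == 1) = true := by
      simp [PySem.Int.mod, Int.fmod_eq_emod]; try omega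
    rw [h1]
    simp [pvEvens, pvOdds]
  | case3 a b t ih =>
    intro m x y
    simp only [PySem.List.enumerate_cons, List.foldl_cons]
    have h1 : (PySem.Int.mod (2 * m + 1) 2 == 1) = true := by
      simp [PySem.Int.mod, Int.fmod_eq_emod]; try omega
    have h2 : (PySem.Int.mod (2 * m + 1 + 1) 2 == 1) = false := by
      simp [PySem.Int.mod, Int.fmod_eq_emod]; try omega
    rw [h1]
    simp only [if_true]
    rw [h2]
    simp only [if_false, Bool.false_eq_true]
    have hm : 2 * m + 1 + 1 = 2 * (m + 1) := by ring
    rw [hm, ih (m + 1) (x + a) (y + b)]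
    simp only [pvEvens, pvOdds, List.sum_cons]
    refine congrArg₂ Prod.mk ?_ ?_ <;> ring

-- ===== VERDICT (by name: the statement is the Claim_ definition above) =====
theorem solution_spec : Claim_equal_solution := by
  intro xs _
  unfold Spec_solution solution solution_alt
  rw [pvSliceEven, pvSliceOdd]
  have h := pvFold xs 0 0 0
  rw [mul_zero, zero_add, zero_add] at h
  simp only [h, Option.getD_some]
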